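-- pv_equiv track=rewrite | github.com/Mehdizaiem/Vault-DueDiligence-4DS1 | Sample_Data/onchain_analytics/analyzers/token_analyzer.py | _categorize_tokens
-- ===== SOURCE A (Python) =====
-- from typing import Dict, List, Any
--
-- def _categorize_tokens(tokens: Dict) -> Dict[str, List[str]]:
--     """Attempt to categorize tokens based on known symbols."""
--     categories = {
--         "stablecoins": [],
--         "defi": [],
--         "gaming": [],
--         "exchange_tokens": [],
--         "privacy": [],
--         "other": []
--     }
--
--     # Known token categories (simplified)
--     stablecoins = ["USDT", "USDC", "DAI", "BUSD", "TUSD", "USDP"]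
--     defi_tokens = ["AAVE", "COMP", "UNI", "SUSHI", "YFI", "MKR", "SNX", "CRV"]
--     gaming_tokens = ["MANA", "AXS", "SAND", "ENJ", "GALA"]
--     exchange_tokens = ["BNB", "CRO", "FTT", "LEO", "HT", "KCS"]
--     privacy_tokens = ["ZEC", "XMR", "DASH", "SCRT"]
--
--     for symbol in tokens.keys():
--         if symbol in stablecoins:
--             categories["stablecoins"].append(symbol)
--         elif symbol in defi_tokens:
--             categories["defi"].append(symbol)
--         elif symbol in gaming_tokens:
--             categories["gaming"].append(symbol)
--         elif symbol in exchange_tokens: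
--             categories["exchange_tokens"].append(symbol)
--         elif symbol in privacy_tokens:
--             categories["privacy"].append(symbol)
--         else:
--             categories["other"].append(symbol)
--
--     return categories
-- ===== SOURCE B (Python) =====
-- def _categorize_tokens(tokens):
--     """Attempt to categorize tokens based on known symbols."""
--     known = {
--         "stablecoins": ["USDT", "USDC", "DAI", "BUSD", "TUSD", "USDP"],
--         "defi": ["AAVE", "COMP", "UNI", "SUSHI", "YFI", "MKR", "SNX", "CRV"],
--         "gaming": ["MANA", "AXS", "SAND", "ENJ", "GALA"],
--         "exchange_tokens": ["BNB", "CRO", "FTT", "LEO", "HT", "KCS"],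
--         "privacy": ["ZEC", "XMR", "DASH", "SCRT"],
--     }
--     symbols = list(tokens.keys())
--     recognized = {s for members in known.values() for s in members}
--     categories = {name: [s for s in symbols if s in members]
--                   for name, members in known.items()}
--     categories["other"] = [s for s in symbols if s not in recognized]
--     return categories
-- ===== Notes on version B (the rewrite author's own statement) =====
-- stated objective: alternative
-- what changed: Replaced A's single accumulating loop with its if/elif chain by staged passes: one filter pass over the key list per category (built as a dict comprehension over a name->members table), plus a final pass collecting unrecognized symbols; correct because the category symbol lists are pairwise disjoint and each filter preserves key order.
import Mathlib
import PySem

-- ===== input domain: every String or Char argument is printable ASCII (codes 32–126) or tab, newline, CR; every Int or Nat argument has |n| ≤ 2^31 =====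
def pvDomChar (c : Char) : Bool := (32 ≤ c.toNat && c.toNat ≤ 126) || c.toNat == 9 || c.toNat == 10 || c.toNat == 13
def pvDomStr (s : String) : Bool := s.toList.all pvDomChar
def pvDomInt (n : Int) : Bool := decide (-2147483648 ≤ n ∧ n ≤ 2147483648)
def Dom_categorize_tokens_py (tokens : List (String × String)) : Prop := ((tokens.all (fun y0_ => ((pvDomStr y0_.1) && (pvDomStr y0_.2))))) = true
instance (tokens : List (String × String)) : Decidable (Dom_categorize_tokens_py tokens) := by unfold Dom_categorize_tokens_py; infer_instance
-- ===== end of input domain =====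

-- B replaces A's single accumulating loop (if/elif chain) by staged filter passes, one per category (alternative decomposition, same cost).

-- ===== PORT A =====
def pvStablecoins : List String := ["USDT", "USDC", "DAI", "BUSD", "TUSD", "USDP"]
def pvDefiTokens : List String := ["AAVE", "COMP", "UNI", "SUSHI", "YFI", "MKR", "SNX", "CRV"]
def pvGamingTokens : List String := ["MANA", "AXS", "SAND", "ENJ", "GALA"]
def pvExchangeTokens : List String := ["BNB", "CRO", "FTT", "LEO", "HT", "KCS"]
def pvPrivacyTokens : List String := ["ZEC", "XMR", "DASH", "SCRT"]

-- the `categories` dict literal A starts from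
def pvInitCats : PySem.Dict String (List String) :=
  PySem.Dict.ofList
    [("stablecoins", []), ("defi", []), ("gaming", []),
     ("exchange_tokens", []), ("privacy", []), ("other", [])]

-- one iteration of A's loop body: the if/elif chain appending symbol to the chosen list
def pvStepA (cats : PySem.Dict String (List String)) (symbol : String) : PySem.Dict String (List String) :=
  if symbol ∈ pvStablecoins then cats.modify "stablecoins" [] (· ++ [symbol])
  else if symbol ∈ pvDefiTokens then cats.modify "defi" [] (· ++ [symbol])
  else if symbol ∈ pvGamingTokens then cats.modify "gaming" [] (· ++ [symbol])
  else if symbol ∈ pvExchangeTokens then cats.modify "exchange_tokens" [] (· ++ [symbol])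
  else if symbol ∈ pvPrivacyTokens then cats.modify "privacy" [] (· ++ [symbol])
  else cats.modify "other" [] (· ++ [symbol])

def categorize_tokens_py (tokens : List (String × String)) : List (String × List String) :=
  (((PySem.Dict.ofList tokens).keys).foldl pvStepA pvInitCats).items

-- ===== PORT B =====
-- B's `known` table: category name -> member symbols
def pvKnown : List (String × List String) :=
  [("stablecoins", ["USDT", "USDC", "DAI", "BUSD", "TUSD", "USDP"]),
   ("defi", ["AAVE", "COMP", "UNI", "SUSHI", "YFI", "MKR", "SNX", "CRV"]),
   ("gaming", ["MANA", "AXS", "SAND", "ENJ", "GALA"]),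
   ("exchange_tokens", ["BNB", "CRO", "FTT", "LEO", "HT", "KCS"]),
   ("privacy", ["ZEC", "XMR", "DASH", "SCRT"])]

def categorize_tokens_py_alt (tokens : List (String × String)) : List (String × List String) :=
  let symbols := (PySem.Dict.ofList tokens).keys
  -- `recognized = {s for members in known.values() for s in members}` (a Python set)
  let recognized := PySem.Set.ofList ((pvKnown.map (·.2)).flatten)
  -- `{name: [s for s in symbols if s in members] for name, members in known.items()}`
  (pvKnown.map (fun p => (p.1, symbols.filter (fun s => decide (s ∈ p.2)))))
  -- `categories["other"] = [s for s in symbols if s not in recognized]`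
    ++ [("other", symbols.filter (fun s => !decide (s ∈ recognized)))]

-- ===== PRECONDITION & SPEC =====
def Spec_categorize_tokens_py (tokens : List (String × String)) (out : List (String × List String)) : Prop := out = categorize_tokens_py_alt tokens
instance (tokens : List (String × String)) (out : List (String × List String)) : Decidable (Spec_categorize_tokens_py tokens out) := by unfold Spec_categorize_tokens_py; infer_instance

-- ===== CLAIM (what is proved, stated in full; the proofs are below) =====
def Claim_equal_categorize_tokens_py : Prop := ∀ (tokens : List (String × String)), Dom_categorize_tokens_py tokens → Spec_categorize_tokens_py tokens (categorize_tokens_py tokens)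

-- ===== LEMMAS AND PROOFS =====

-- A's loop invariant: folding pvStepA over the six-key dict appends, per key, exactly
-- the symbols its if/elif branch selects, in traversal order.
theorem pvFoldA_inv (syms : List String) (l1 l2 l3 l4 l5 l6 : List String) :
    syms.foldl pvStepA (PySem.Dict.mk
      [("stablecoins", l1), ("defi", l2), ("gaming", l3),
       ("exchange_tokens", l4), ("privacy", l5), ("other", l6)]) =
    PySem.Dict.mk
      [("stablecoins", l1 ++ syms.filter (fun s => decide (s ∈ pvStablecoins))),
       ("defi", l2 ++ syms.filter (fun s => decide (s ∉ pvStablecoins ∧ s ∈ pvDefiTokens))),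
       ("gaming", l3 ++ syms.filter (fun s => decide (s ∉ pvStablecoins ∧ s ∉ pvDefiTokens ∧ s ∈ pvGamingTokens))),
       ("exchange_tokens", l4 ++ syms.filter (fun s => decide (s ∉ pvStablecoins ∧ s ∉ pvDefiTokens ∧ s ∉ pvGamingTokens ∧ s ∈ pvExchangeTokens))),
       ("privacy", l5 ++ syms.filter (fun s => decide (s ∉ pvStablecoins ∧ s ∉ pvDefiTokens ∧ s ∉ pvGamingTokens ∧ s ∉ pvExchangeTokens ∧ s ∈ pvPrivacyTokens))),
       ("other", l6 ++ syms.filter (fun s => decide (s ∉ pvStablecoins ∧ s ∉ pvDefiTokens ∧ s ∉ pvGamingTokens ∧ s ∉ pvExchangeTokens ∧ s ∉ pvPrivacyTokens)))] := by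
  induction syms generalizing l1 l2 l3 l4 l5 l6 with
  | nil => simp
  | cons s rest ih =>
    by_cases h1 : s ∈ pvStablecoins <;> by_cases h2 : s ∈ pvDefiTokens <;>
      by_cases h3 : s ∈ pvGamingTokens <;> by_cases h4 : s ∈ pvExchangeTokens <;>
      by_cases h5 : s ∈ pvPrivacyTokens <;>
    simp [pvStepA, h1, h2, h3, h4, h5, PySem.Dict.modify, PySem.Dict.insert,
      PySem.Dict.getD, PySem.Dict.get?, PySem.Dict.contains, ih]

-- the five category lists are pairwise disjoint, so A's first-match (if/elif) filters
-- coincide with B's plain-membership filters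
theorem pvPredDefi :
    (fun s => decide (s ∉ pvStablecoins ∧ s ∈ pvDefiTokens)) =
    (fun s : String => decide (s ∈ pvDefiTokens)) := by
  funext s
  simp only [decide_eq_decide]
  constructor
  · rintro ⟨_, h⟩; exact h
  · intro h
    refine ⟨?_, h⟩
    simp only [pvDefiTokens, List.mem_cons, List.not_mem_nil, or_false] at h
    rcases h with h|h|h|h|h|h|h|h <;> subst h <;> decide

theorem pvPredGaming :
    (fun s => decide (s ∉ pvStablecoins ∧ s ∉ pvDefiTokens ∧ s ∈ pvGamingTokens)) =
    (fun s : String => decide (s ∈ pvGamingTokens)) := by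
  funext s
  simp only [decide_eq_decide]
  constructor
  · rintro ⟨_, _, h⟩; exact h
  · intro h
    refine ⟨?_, ?_, h⟩ <;>
    · simp only [pvGamingTokens, List.mem_cons, List.not_mem_nil, or_false] at h
      rcases h with h|h|h|h|h <;> subst h <;> decide

theorem pvPredExchange :
    (fun s => decide (s ∉ pvStablecoins ∧ s ∉ pvDefiTokens ∧ s ∉ pvGamingTokens ∧ s ∈ pvExchangeTokens)) =
    (fun s : String => decide (s ∈ pvExchangeTokens)) := by
  funext s
  simp only [decide_eq_decide]
  constructor
  · rintro ⟨_, _, _, h⟩; exact h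
  · intro h
    refine ⟨?_, ?_, ?_, h⟩ <;>
    · simp only [pvExchangeTokens, List.mem_cons, List.not_mem_nil, or_false] at h
      rcases h with h|h|h|h|h|h <;> subst h <;> decide

theorem pvPredPrivacy :
    (fun s => decide (s ∉ pvStablecoins ∧ s ∉ pvDefiTokens ∧ s ∉ pvGamingTokens ∧ s ∉ pvExchangeTokens ∧ s ∈ pvPrivacyTokens)) =
    (fun s : String => decide (s ∈ pvPrivacyTokens)) := by
  funext s
  simp only [decide_eq_decide]
  constructor
  · rintro ⟨_, _, _, _, h⟩; exact h
  · intro h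
    refine ⟨?_, ?_, ?_, ?_, h⟩ <;>
    · simp only [pvPrivacyTokens, List.mem_cons, List.not_mem_nil, or_false] at h
      rcases h with h|h|h|h <;> subst h <;> decide

-- A's final else-branch condition equals non-membership in B's `recognized` set
theorem pvPredOther :
    (fun s => decide (s ∉ pvStablecoins ∧ s ∉ pvDefiTokens ∧ s ∉ pvGamingTokens ∧ s ∉ pvExchangeTokens ∧ s ∉ pvPrivacyTokens)) =
    (fun s : String => !decide (s ∈ PySem.Set.ofList ((pvKnown.map (·.2)).flatten))) := by
  funext s
  rw [← decide_not, decide_eq_decide, PySem.Set.mem_ofList]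
  simp [pvKnown, pvStablecoins, pvDefiTokens, pvGamingTokens, pvExchangeTokens,
    pvPrivacyTokens]
  tauto

-- ===== VERDICT (by name: the statement is the Claim_ definition above) =====
theorem categorize_tokens_py_spec : Claim_equal_categorize_tokens_py := by
  intro tokens _
  unfold Spec_categorize_tokens_py categorize_tokens_py categorize_tokens_py_alt
  have hinit : pvInitCats = PySem.Dict.mk
      [("stablecoins", []), ("defi", []), ("gaming", []),
       ("exchange_tokens", []), ("privacy", []), ("other", [])] := by decide
  rw [hinit, pvFoldA_inv, pvPredDefi, pvPredGaming, pvPredExchange, pvPredPrivacy, pvPredOther]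
  rfl
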